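-- pv_equiv track=rewrite | github.com/KirstenLNelson/epsilon-almost-covering-arrays | gencoverarrays.py | create_base_row
-- ===== SOURCE A (Python) =====
-- import math
--
-- def create_base_row(N, v):
-- # ------------------------------------------------------
-- # Examples:
--     '''
--     >>> create_base_row(10,3)
--     [0, 0, 0, 0, 1, 1, 1, 2, 2, 2]
--     >>> create_base_row(8,2)
--     [0, 0, 0, 0, 1, 1, 1, 1]
--     '''
-- # Initialize the list we'll be returning
--     base_row = []
-- # We'll be adding at least this many of each symbol; e.g. floor(10/3)=3, floor(8/2)=4.
--     base_num = math.floor(N/v)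
-- # We'll be adding one extra of some symbols, starting with the smallest one, to make up the difference;
-- # e.g. 10 % 3 = 1 so we'll add an extra 0, 8 % 2 = 0 so we don't need any extras.
--     extra_num = N % v
-- # Loop over all the symbols we're adding
--     for k in range(0, v):
-- # For each symbol, add at least the base number
--         for l in range(0, base_num):
--             base_row.append(k)
-- # If we're in the smaller numbers, add the extra symbol; e.g. for 10/3 we add an extra 0.
--         if k < extra_num:
--             base_row.append(k)
--     return base_row
-- ===== SOURCE B (Python) =====
-- def create_base_row(N, v):
--     base_num = N // v
--     extra_num = N % v
--     t = extra_num * (base_num + 1)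
--     row = []
--     for i in range(N):
--         if i < t:
--             row.append(i // (base_num + 1))
--         else:
--             row.append(extra_num + (i - t) // base_num)
--     return row
-- ===== Notes on version B (the rewrite author's own statement) =====
-- stated objective: alternative
-- what changed: B loops over the N output positions and computes each symbol arithmetically from its index (threshold t = extra_num*(base_num+1)), instead of A's nested loops over symbols appending base/extra counts.
-- intended difference: For N < 0 (with v >= 1 and v not dividing N) A returns the leftover list [0..N%v-1] produced by its skipped inner loop, while B returns [], the intended row of nonpositive length. — e.g. on create_base_row(-1, 2): A returns [0], B returns []
-- outside the precondition, e.g. on create_base_row(5, -3): A returns [], B returns [0, -1, -2, -2, -3]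
import Mathlib
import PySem

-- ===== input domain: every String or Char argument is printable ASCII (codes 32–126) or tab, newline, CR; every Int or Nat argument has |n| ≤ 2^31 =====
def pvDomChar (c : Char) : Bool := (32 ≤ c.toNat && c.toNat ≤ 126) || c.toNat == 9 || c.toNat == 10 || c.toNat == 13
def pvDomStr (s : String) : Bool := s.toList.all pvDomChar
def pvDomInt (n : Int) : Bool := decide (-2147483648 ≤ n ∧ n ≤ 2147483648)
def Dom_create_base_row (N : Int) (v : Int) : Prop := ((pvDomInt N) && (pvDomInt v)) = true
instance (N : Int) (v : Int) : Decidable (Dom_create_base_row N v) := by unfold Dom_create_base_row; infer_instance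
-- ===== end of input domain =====

-- B computes each of the N output symbols arithmetically from its position instead of
-- looping over symbols and appending counts (objective: alternative; same cost).

-- ===== PORT A =====
-- math.floor(N/v) is ported as exact floor division: for |N|,|v| ≤ 2^31 the float
-- quotient N/v never rounds across an integer, so math.floor(N/v) = N // v on Dom.
def create_base_row (N : Int) (v : Int) : List Int :=
  let base_num := PySem.Int.floordiv N v
  let extra_num := PySem.Int.mod N v
  (PySem.List.pyRange 0 v 1).foldl (fun base_row k =>
    let base_row := (PySem.List.pyRange 0 base_num 1).foldl (fun br _l => br ++ [k]) base_row
    if k < extra_num then base_row ++ [k] else base_row) []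

-- ===== PORT B =====
def create_base_row_alt (N : Int) (v : Int) : List Int :=
  let base_num := PySem.Int.floordiv N v
  let extra_num := PySem.Int.mod N v
  let t := extra_num * (base_num + 1)
  (PySem.List.pyRange 0 N 1).foldl (fun row i =>
    row ++ [if i < t then PySem.Int.floordiv i (base_num + 1)
            else extra_num + PySem.Int.floordiv (i - t) base_num]) []

-- ===== PRECONDITION & SPEC =====
-- Pre_ excludes v = 0, where A raises ZeroDivisionError, and v < 0 with N > 0, where
-- A's empty range(0, v) accidentally yields [] — a value outside the function's natural
-- domain (v is a positive number of symbols) that B's position loop has no reason to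
-- produce (for v < 0 with N ≤ 0 both programs return [] and the input stays inside Pre_).
def Pre_create_base_row (N : Int) (v : Int) : Prop := 1 ≤ v ∨ (v ≤ -1 ∧ N ≤ 0)
instance (N : Int) (v : Int) : Decidable (Pre_create_base_row N v) := by unfold Pre_create_base_row; infer_instance
def pvWitness_create_base_row : Int × Int := (10, 3)

-- For N < 0 (v ≥ 1, v ∤ N) A returns the leftover [0..N%v-1] from its skipped inner
-- loop; B returns [], the intended row of nonpositive length.
def D_create_base_row (N : Int) (v : Int) : Prop := N < 0 ∧ 1 ≤ v ∧ PySem.Int.mod N v ≠ 0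
instance (N : Int) (v : Int) : Decidable (D_create_base_row N v) := by unfold D_create_base_row; infer_instance

def Spec_create_base_row (N : Int) (v : Int) (out : List Int) : Prop := ¬ D_create_base_row N v → out = create_base_row_alt N v
instance (N : Int) (v : Int) (out : List Int) : Decidable (Spec_create_base_row N v out) := by unfold Spec_create_base_row; infer_instance

def pvDiffWitness_create_base_row : Int × Int := (-1, 2)
def pvDiffWitnessOut_create_base_row : (List Int) × (List Int) := ([0], [])

-- ===== CLAIM (what is proved, stated in full; the proofs are below) =====
def Claim_unchanged_create_base_row : Prop := ∀ (N : Int) (v : Int), Dom_create_base_row N v → Pre_create_base_row N v → Spec_create_base_row N v (create_base_row N v)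
def Claim_changed_create_base_row : Prop := Dom_create_base_row (pvDiffWitness_create_base_row.1) (pvDiffWitness_create_base_row.2) ∧ Pre_create_base_row (pvDiffWitness_create_base_row.1) (pvDiffWitness_create_base_row.2) ∧ D_create_base_row (pvDiffWitness_create_base_row.1) (pvDiffWitness_create_base_row.2) ∧ create_base_row (pvDiffWitness_create_base_row.1) (pvDiffWitness_create_base_row.2) = pvDiffWitnessOut_create_base_row.1 ∧ create_base_row_alt (pvDiffWitness_create_base_row.1) (pvDiffWitness_create_base_row.2) = pvDiffWitnessOut_create_base_row.2 ∧ pvDiffWitnessOut_create_base_row.1 ≠ pvDiffWitnessOut_create_base_row.2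
def Claim_exact_create_base_row : Prop := ∀ (N : Int) (v : Int), Dom_create_base_row N v → Pre_create_base_row N v → D_create_base_row N v → create_base_row N v ≠ create_base_row_alt N v

-- ===== LEMMAS AND PROOFS =====

-- A's inner loop appends the symbol k once per iteration: it is a replicate.
lemma foldl_append_const {α : Type} (k : α) (l : List Int) (br : List α) :
    l.foldl (fun br _ => br ++ [k]) br = br ++ List.replicate l.length k := by
  induction l generalizing br with
  | nil => simp
  | cons x xs ih =>
    simp [List.foldl_cons, ih, List.replicate_succ]

lemma A_fold_eq (b e : Int) (l : List Int) (acc : List Int) :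
    l.foldl (fun base_row k =>
      let base_row := (PySem.List.pyRange 0 b 1).foldl (fun br _l => br ++ [k]) base_row
      if k < e then base_row ++ [k] else base_row) acc
    = acc ++ l.flatMap (fun k =>
        List.replicate b.toNat k ++ if k < e then [k] else []) := by
  induction l generalizing acc with
  | nil => simp
  | cons x xs ih =>
    simp only [List.foldl_cons, List.flatMap_cons]
    rw [foldl_append_const]
    have hlen : (PySem.List.pyRange 0 b 1).length = b.toNat := by
      rw [PySem.List.length_pyRange_one]; simp
    rw [hlen]
    split_ifs with h <;> rw [ih] <;> simp

-- closed form of A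
lemma A_closed (N v : Int) :
    create_base_row N v =
      (PySem.List.pyRange 0 v 1).flatMap (fun k =>
        List.replicate (PySem.Int.floordiv N v).toNat k ++
          (if k < PySem.Int.mod N v then [k] else [])) := by
  unfold create_base_row
  rw [A_fold_eq]
  simp

-- closed form of B
lemma B_closed (N v : Int) :
    create_base_row_alt N v =
      (PySem.List.pyRange 0 N 1).map (fun i =>
        if i < PySem.Int.mod N v * (PySem.Int.floordiv N v + 1)
        then PySem.Int.floordiv i (PySem.Int.floordiv N v + 1)
        else PySem.Int.mod N v + PySem.Int.floordiv (i - PySem.Int.mod N v * (PySem.Int.floordiv N v + 1)) (PySem.Int.floordiv N v)) := by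
  unfold create_base_row_alt
  exact PySem.List.foldl_append_singleton_eq_map _ _ _

-- a map that is constant on an integer range is a replicate
lemma map_const_on (f : Int → Int) (a bnd k : Int)
    (h : ∀ i, a ≤ i → i < bnd → f i = k) :
    (PySem.List.pyRange a bnd 1).map f = List.replicate (bnd - a).toNat k := by
  rw [List.eq_replicate_iff]
  constructor
  · rw [List.length_map, PySem.List.length_pyRange_one]
  · intro x hx
    obtain ⟨i, hi, rfl⟩ := List.mem_map.mp hx
    obtain ⟨h1, h2⟩ := PySem.List.mem_pyRange_one.mp hi
    exact h i h1 h2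

-- the positional formula, segment by segment
lemma seg_eq (b e n : Int) (hb : 0 ≤ b) :
    (PySem.List.pyRange (n*b + min n e) ((n+1)*b + min (n+1) e) 1).map
      (fun i => if i < e*(b+1) then PySem.Int.floordiv i (b+1)
                else e + PySem.Int.floordiv (i - e*(b+1)) b)
    = List.replicate b.toNat n ++ (if n < e then [n] else []) := by
  by_cases hne : n < e
  · -- segment [n*(b+1), (n+1)*(b+1)), entirely below the threshold
    have hmin1 : min n e = n := by omega
    have hmin2 : min (n+1) e = n+1 := by omega
    rw [hmin1, hmin2]
    have hlo : n*b + n = n*(b+1) := by ring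
    have hhi : (n+1)*b + (n+1) = (n+1)*(b+1) := by ring
    rw [hlo, hhi]
    rw [map_const_on _ _ _ n ?_]
    · have hd : ((n+1)*(b+1) - n*(b+1)).toNat = b.toNat + 1 := by
        have : (n+1)*(b+1) - n*(b+1) = b + 1 := by ring
        rw [this]; omega
      rw [hd, if_pos hne, List.replicate_succ']
    · intro i h1 h2
      have ht : (n+1)*(b+1) ≤ e*(b+1) :=
        mul_le_mul_of_nonneg_right (by omega) (by omega)
      rw [if_pos (by omega)]
      exact (PySem.Int.floordiv_eq_iff_of_pos (by omega)).mpr ⟨h1, h2⟩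
  · -- segment [n*b + e, (n+1)*b + e), entirely at or above the threshold
    have hmin1 : min n e = e := by omega
    have hmin2 : min (n+1) e = e := by omega
    rw [hmin1, hmin2]
    rw [map_const_on _ _ _ n ?_]
    · have hd : ((n+1)*b + e - (n*b + e)).toNat = b.toNat := by
        have : (n+1)*b + e - (n*b + e) = b := by ring
        rw [this]
      rw [hd, if_neg hne, List.append_nil]
    · intro i h1 h2
      have hbpos : 0 < b := by
        have : (n+1)*b + e - (n*b + e) = b := by ring
        nlinarith
      have hent : e*(b+1) ≤ n*b + e := by nlinarith
      rw [if_neg (by omega)]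
      have : PySem.Int.floordiv (i - e*(b+1)) b = n - e := by
        refine (PySem.Int.floordiv_eq_iff_of_pos hbpos).mpr ⟨by nlinarith, by nlinarith⟩
      rw [this]; ring

lemma main_ind (b e v : Int) (hb : 0 ≤ b) (he : 0 ≤ e) :
    ∀ n : Nat, (n : Int) ≤ v →
    (PySem.List.pyRange 0 n 1).flatMap (fun k =>
        List.replicate b.toNat k ++ if k < e then [k] else [])
    = (PySem.List.pyRange 0 ((n:Int)*b + min (n:Int) e) 1).map
        (fun i => if i < e*(b+1) then PySem.Int.floordiv i (b+1)
                  else e + PySem.Int.floordiv (i - e*(b+1)) b) := by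
  intro n
  induction n with
  | zero => simp
  | succ m ih =>
    intro h
    have hm : (m : Int) ≤ v := by push_cast at h ⊢; omega
    have hcast : ((m+1 : Nat) : Int) = (m : Int) + 1 := by push_cast; ring
    rw [hcast]
    rw [PySem.List.pyRange_one_succ_right (by positivity)]
    rw [List.flatMap_append, ih hm]
    have hL1 : 0 ≤ (m:Int)*b + min (m:Int) e := by
      have : 0 ≤ (m:Int)*b := by positivity
      omega
    have hstep : (m:Int)*b + min (m:Int) e ≤ ((m:Int)+1)*b + min ((m:Int)+1) e := by
      have : ((m:Int)+1)*b = (m:Int)*b + b := by ring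
      omega
    rw [PySem.List.pyRange_one_append 0 ((m:Int)*b + min (m:Int) e)
          (((m:Int)+1)*b + min ((m:Int)+1) e) hL1 hstep]
    rw [List.map_append]
    congr 1
    rw [seg_eq b e (m:Int) hb]
    simp

-- the two closed forms agree for N ≥ 0, v ≥ 1
lemma pos_case (N v : Int) (hv : 1 ≤ v) (hN : 0 ≤ N) :
    create_base_row N v = create_base_row_alt N v := by
  have hvpos : (0:Int) < v := by omega
  set b := PySem.Int.floordiv N v with hbdef
  set e := PySem.Int.mod N v with hedef
  have hb : 0 ≤ b := by
    rw [hbdef, PySem.Int.floordiv_eq_ediv_of_pos hvpos]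
    exact Int.ediv_nonneg hN (by omega)
  have he : 0 ≤ e := PySem.Int.mod_nonneg N hvpos
  have hev : e < v := PySem.Int.mod_lt N hvpos
  have hNbe : b * v + e = N := PySem.Int.floordiv_mul_add_mod N v
  rw [A_closed, B_closed]
  have := main_ind b e v hb he v.toNat (by omega)
  have hvt : ((v.toNat : Nat) : Int) = v := by omega
  rw [hvt] at this
  have hcnt : v * b + min v e = N := by
    have : min v e = e := by omega
    rw [this]; linarith [hNbe]
  rw [hcnt] at this
  exact this

lemma b_neg (N v : Int) (hv : 1 ≤ v) (hN : N < 0) :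
    (PySem.Int.floordiv N v).toNat = 0 := by
  have hvpos : (0:Int) < v := by omega
  have he : 0 ≤ PySem.Int.mod N v := PySem.Int.mod_nonneg N hvpos
  have hev : PySem.Int.mod N v < v := PySem.Int.mod_lt N hvpos
  have hNbe := PySem.Int.floordiv_mul_add_mod N v
  by_contra h
  have hb : 1 ≤ PySem.Int.floordiv N v := by omega
  nlinarith

theorem create_base_row_spec : Claim_unchanged_create_base_row := by
  intro N v _ hPre hND
  unfold Pre_create_base_row at hPre
  rcases hPre with hPre | ⟨hv, hN0⟩
  swap
  · -- v < 0 and N ≤ 0: both sides are []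
    rw [A_closed, B_closed,
        PySem.List.pyRange_one_eq_nil (by omega : v ≤ 0),
        PySem.List.pyRange_one_eq_nil (by omega : N ≤ 0)]
    simp
  by_cases hN : 0 ≤ N
  · exact pos_case N v hPre hN
  · -- N < 0 and (¬D_) force v ∣ N, i.e. mod = 0: both sides are []
    have hmod : PySem.Int.mod N v = 0 := by
      unfold D_create_base_row at hND
      by_contra h
      exact hND ⟨by omega, hPre, h⟩
    rw [A_closed, B_closed]
    rw [PySem.List.pyRange_one_eq_nil (by omega : N ≤ 0), List.map_nil]
    rw [List.flatMap_eq_nil_iff]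
    intro k hk
    obtain ⟨h1, _⟩ := PySem.List.mem_pyRange_one.mp hk
    rw [b_neg N v hPre (by omega), hmod]
    simp; omega

theorem create_base_row_changed : Claim_changed_create_base_row := by
  unfold Claim_changed_create_base_row; decide

theorem create_base_row_tight : Claim_exact_create_base_row := by
  intro N v _ hPre hD
  obtain ⟨hN, hv, hmod⟩ := hD
  have hvpos : (0:Int) < v := by omega
  have he : 0 < PySem.Int.mod N v := by
    have := PySem.Int.mod_nonneg N hvpos
    omega
  intro hEq
  have hB : create_base_row_alt N v = [] := by
    rw [B_closed, PySem.List.pyRange_one_eq_nil (by omega : N ≤ 0), List.map_nil]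
  have hA : (0:Int) ∈ create_base_row N v := by
    rw [A_closed]
    refine List.mem_flatMap.mpr ⟨0, PySem.List.mem_pyRange_one.mpr ⟨le_refl 0, hvpos⟩, ?_⟩
    rw [b_neg N v hv hN]
    simp [he]
  rw [hEq, hB] at hA
  exact List.not_mem_nil hA
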